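-- pv_equiv track=rewrite | github.com/starius/config | .bin/plowbackup.py | escape_file
-- ===== SOURCE A (Python) =====
-- PARTS_DIR = '$parts_dir/'
--
-- def escape_file(arg):
--     if arg in ('$f1', '$f2', '$f'):
--         return arg
--     if arg.startswith(PARTS_DIR):
--         prefix_length = len(PARTS_DIR)
--         other = arg[prefix_length:]
--         return PARTS_DIR + escape_file(other)
--     if arg.startswith('-'):
--         arg = './' + arg
--     return "'%s'" % arg.replace("'", r"'\''")
-- ===== SOURCE B (Python) =====
-- PARTS_DIR = '$parts_dir/'
--
-- def escape_file(arg):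
--     # Iterative: peel all leading '$parts_dir/' prefixes counting them,
--     # handle the remainder once, then re-prepend the prefix n times.
--     n = 0
--     while arg.startswith(PARTS_DIR):
--         arg = arg[len(PARTS_DIR):]
--         n += 1
--     if arg in ('$f1', '$f2', '$f'):
--         body = arg
--     else:
--         if arg.startswith('-'):
--             arg = './' + arg
--         body = "'" + arg.replace("'", "'\\''") + "'"
--     return PARTS_DIR * n + body
-- ===== Notes on version B (the rewrite author's own statement) =====
-- stated objective: alternative
-- what changed: Replaced A's tail recursion over stacked parts-dir prefixes with a counting while-loop that peels every prefix first, handles the remainder once, and re-prepends the prefix by repetition.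
import Mathlib
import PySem

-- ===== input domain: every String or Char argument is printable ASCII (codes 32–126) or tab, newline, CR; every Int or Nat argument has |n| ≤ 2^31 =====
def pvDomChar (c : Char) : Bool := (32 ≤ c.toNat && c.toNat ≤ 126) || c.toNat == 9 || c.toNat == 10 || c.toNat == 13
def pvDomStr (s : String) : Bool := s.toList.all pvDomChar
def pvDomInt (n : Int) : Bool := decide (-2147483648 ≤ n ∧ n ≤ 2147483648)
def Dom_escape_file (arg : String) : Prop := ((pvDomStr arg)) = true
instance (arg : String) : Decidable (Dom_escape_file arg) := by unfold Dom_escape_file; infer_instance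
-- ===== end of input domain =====

-- B iterates (peel-count-rebuild) where A recurses; the return value is proved identical on all inputs.

-- PARTS_DIR = '$parts_dir/'
def pvPartsDir : List Char := "$parts_dir/".toList

-- arg[len(PARTS_DIR):] strips one prefix; strictly shorter when the prefix is present (termination of both ports)
theorem pvStripLt (s : List Char) (h : PySem.Chars.startswith s pvPartsDir = true) :
    (PySem.Chars.slice s (some 11) none).length < s.length := by
  have hp : pvPartsDir <+: s := (PySem.Chars.startswith_iff s pvPartsDir).mp h
  have hl : 11 ≤ s.length := by simpa [pvPartsDir] using hp.length_le
  have hd : PySem.Chars.slice s (some 11) none = s.drop (11 : Int).toNat := by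
    rw [PySem.Chars.slice_eq_listSlice, PySem.List.slice_from s (by norm_num)]
  rw [hd]
  simp
  omega

-- ===== PORT A =====
-- literal transliteration of A's recursion over List Char
def pvEscA (s : List Char) : List Char :=
  if s = "$f1".toList ∨ s = "$f2".toList ∨ s = "$f".toList then s
  else if _h : PySem.Chars.startswith s pvPartsDir = true then
    pvPartsDir ++ pvEscA (PySem.Chars.slice s (some 11) none)
  else
    let s2 := if PySem.Chars.startswith s ['-'] then '.' :: '/' :: s else s
    '\'' :: (PySem.Chars.replace s2 ['\''] "'\\''".toList ++ ['\''])
termination_by s.length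
decreasing_by exact pvStripLt s _h

def escape_file (arg : String) : String := String.ofList (pvEscA arg.toList)

-- ===== PORT B =====
-- the while-loop: count prefixes stripped, return (count, remainder)
def pvPeel (s : List Char) : Nat × List Char :=
  if h : PySem.Chars.startswith s pvPartsDir = true then
    let p := pvPeel (PySem.Chars.slice s (some 11) none)
    (p.1 + 1, p.2)
  else (0, s)
termination_by s.length
decreasing_by exact pvStripLt s h

-- PARTS_DIR * n
def pvRepeat (n : Nat) : List Char :=
  match n with
  | 0 => []
  | n + 1 => pvPartsDir ++ pvRepeat n

-- the post-loop body computation of B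
def pvBase (r : List Char) : List Char :=
  if r = "$f1".toList ∨ r = "$f2".toList ∨ r = "$f".toList then r
  else
    let r2 := if PySem.Chars.startswith r ['-'] then '.' :: '/' :: r else r
    '\'' :: (PySem.Chars.replace r2 ['\''] "'\\''".toList ++ ['\''])

def escape_file_alt (arg : String) : String :=
  let p := pvPeel arg.toList
  String.ofList (pvRepeat p.1 ++ pvBase p.2)

-- ===== PRECONDITION & SPEC =====
def Spec_escape_file (arg : String) (out : String) : Prop := out = escape_file_alt arg
instance (arg : String) (out : String) : Decidable (Spec_escape_file arg out) := by unfold Spec_escape_file; infer_instance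

-- ===== CLAIM (what is proved, stated in full; the proofs are below) =====
def Claim_equal_escape_file : Prop := ∀ (arg : String), Dom_escape_file arg → Spec_escape_file arg (escape_file arg)

-- ===== LEMMAS AND PROOFS =====

theorem pvEscA_eq (s : List Char) : pvEscA s = pvRepeat (pvPeel s).1 ++ pvBase (pvPeel s).2 := by
  induction s using pvEscA.induct with
  | case1 s hs =>
      have hns : ¬ PySem.Chars.startswith s pvPartsDir = true := by
        rcases hs with h | h | h <;> subst h <;> decide
      rw [pvEscA, pvPeel]
      simp [hns, pvRepeat, pvBase]
  | case2 s hs h ih =>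
      have hs' : ¬(s = ['$', 'f', '1'] ∨ s = ['$', 'f', '2'] ∨ s = ['$', 'f']) := by simpa using hs
      rw [pvEscA, pvPeel]
      simp [hs', h, pvRepeat, List.append_assoc]
      simpa using ih
  | case3 s hs h =>
      rw [pvEscA, pvPeel]
      simp [h, pvRepeat, pvBase]

-- ===== VERDICT (by name: the statement is the Claim_ definition above) =====
theorem escape_file_spec : Claim_equal_escape_file := by
  intro arg _
  unfold Spec_escape_file escape_file escape_file_alt
  rw [pvEscA_eq]
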